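-- pv_equiv track=rewrite | github.com/annaulazar/algorithms_practice | Trenirovka_7_0/Prefsumm_treeset/task_g.py | get_treeset
-- ===== SOURCE A (Python) =====
-- def get_treeset(array):
--     degree_two = 0
--     while 2 ** degree_two < len(array):
--         degree_two += 1
--     size = 2 ** degree_two
--     tree_set = [(0, 0, 0, 1)] * (size * 2 - 1)  # (самый длинный отр. из 0 внутри, самый длинный префикс из 0, самый длинный суф. из 0, длина отрезка)
--     for i in range(len(array)):
--         if array[i] == 0:
--             tree_set[i + size - 1] = (1, 1, 1, 1)
--         else:
--             tree_set[i + size - 1] = (0, 0, 0, 1)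
--     for j in range(size - 2, -1, -1):
--         left_child = tree_set[2 * j + 1]
--         right_child = tree_set[2 * j + 2]
--         max_set = max(left_child[0], right_child[0], left_child[2] + right_child[1])
--         if left_child[0] == left_child[3]:
--             pref = left_child[0] + right_child[1]
--         else:
--             pref = left_child[1]
--         if right_child[0] == right_child[3]:
--             suf = right_child[0] + left_child[2]
--         else:
--             suf = right_child[2]
--         length = left_child[3] + right_child[3]
--         tree_set[j] = (max_set, pref, suf, length)
--
--     return tree_set, size
-- ===== SOURCE B (Python) =====
-- def get_treeset(array):
--     degree_two = 0
--     while 2 ** degree_two < len(array):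
--         degree_two += 1
--     size = 2 ** degree_two
--
--     def value(node):
--         # post-order recursion: leaves directly, internal nodes from their children
--         if node >= size - 1:
--             i = node - (size - 1)
--             if i < len(array) and array[i] == 0:
--                 return (1, 1, 1, 1)
--             return (0, 0, 0, 1)
--         left = value(2 * node + 1)
--         right = value(2 * node + 2)
--         max_set = max(left[0], right[0], left[2] + right[1])
--         pref = left[0] + right[1] if left[0] == left[3] else left[1]
--         suf = right[0] + left[2] if right[0] == right[3] else right[2]
--         return (max_set, pref, suf, left[3] + right[3])
--
--     return [value(node) for node in range(2 * size - 1)], size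
-- ===== Notes on version B (the rewrite author's own statement) =====
-- stated objective: alternative
-- what changed: Replaces the preallocated array with a forward leaf loop plus a reverse internal-node loop by a pure post-order recursion computing each node's tuple from its children, with the tree emitted as a comprehension over node indices.
import Mathlib
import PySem

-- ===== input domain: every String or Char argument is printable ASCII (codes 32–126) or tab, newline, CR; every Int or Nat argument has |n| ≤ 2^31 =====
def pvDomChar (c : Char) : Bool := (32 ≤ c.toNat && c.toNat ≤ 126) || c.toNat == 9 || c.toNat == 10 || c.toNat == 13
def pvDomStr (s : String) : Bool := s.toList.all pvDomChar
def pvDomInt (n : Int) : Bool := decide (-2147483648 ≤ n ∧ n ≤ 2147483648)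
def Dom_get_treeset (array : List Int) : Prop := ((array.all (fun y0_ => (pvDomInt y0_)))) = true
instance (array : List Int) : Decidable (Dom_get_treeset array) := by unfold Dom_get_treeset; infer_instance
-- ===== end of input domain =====

-- B rebuilds the tree by a post-order recursion over node indices instead of A's
-- forward leaf loop plus reverse internal loop over a mutated array; same output.

-- ===== PORT A =====
-- while 2 ** degree_two < len(array): degree_two += 1   (shared by both Pythons verbatim)
def pvDegree (n : Nat) (d : Nat) : Nat :=
  if 2 ^ d < n then pvDegree n (d + 1) else d
termination_by n - d
decreasing_by
  have hd : d < 2 ^ d := Nat.lt_two_pow_self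
  omega

def get_treeset (array : List Int) : (List (Int × Int × Int × Int)) × Int :=
  let size : Nat := 2 ^ pvDegree array.length 0
  let init : List (Int × Int × Int × Int) := List.replicate (size * 2 - 1) (0, 0, 0, 1)
  let afterLeaves :=
    (List.range array.length).foldl (fun ts i =>
      if array.getD i 0 = 0 then ts.set (i + size - 1) (1, 1, 1, 1)
      else ts.set (i + size - 1) (0, 0, 0, 1)) init
  let final :=
    (PySem.List.pyRange ((size : Int) - 2) (-1) (-1)).foldl (fun ts j =>
      let jn := j.toNat
      let L := ts.getD (2 * jn + 1) (0, 0, 0, 1)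
      let R := ts.getD (2 * jn + 2) (0, 0, 0, 1)
      let max_set := max (max L.1 R.1) (L.2.2.1 + R.2.1)
      let pref := if L.1 = L.2.2.2 then L.1 + R.2.1 else L.2.1
      let suf := if R.1 = R.2.2.2 then R.1 + L.2.2.1 else R.2.2.1
      let length := L.2.2.2 + R.2.2.2
      ts.set jn (max_set, pref, suf, length)) afterLeaves
  (final, (size : Int))

-- ===== PORT B =====
def pvValue (array : List Int) (size : Nat) (node : Nat) : Int × Int × Int × Int :=
  if h : size - 1 ≤ node then
    let i := node - (size - 1)
    if i < array.length ∧ array.getD i 0 = 0 then (1, 1, 1, 1) else (0, 0, 0, 1)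
  else
    let left := pvValue array size (2 * node + 1)
    let right := pvValue array size (2 * node + 2)
    let max_set := max (max left.1 right.1) (left.2.2.1 + right.2.1)
    let pref := if left.1 = left.2.2.2 then left.1 + right.2.1 else left.2.1
    let suf := if right.1 = right.2.2.2 then right.1 + left.2.2.1 else right.2.2.1
    (max_set, pref, suf, left.2.2.2 + right.2.2.2)
termination_by size - node
decreasing_by all_goals omega

def get_treeset_alt (array : List Int) : (List (Int × Int × Int × Int)) × Int :=
  let size : Nat := 2 ^ pvDegree array.length 0
  ((List.range (2 * size - 1)).map (pvValue array size), (size : Int))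

-- ===== PRECONDITION & SPEC =====
def Spec_get_treeset (array : List Int) (out : (List (Int × Int × Int × Int)) × Int) : Prop := out = get_treeset_alt array
instance (array : List Int) (out : (List (Int × Int × Int × Int)) × Int) : Decidable (Spec_get_treeset array out) := by unfold Spec_get_treeset; infer_instance

-- ===== CLAIM (what is proved, stated in full; the proofs are below) =====
def Claim_equal_get_treeset : Prop := ∀ (array : List Int), Dom_get_treeset array → Spec_get_treeset array (get_treeset array)

-- ===== LEMMAS AND PROOFS =====

theorem pvDegree_ge (n d : Nat) : n ≤ 2 ^ pvDegree n d := by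
  fun_induction pvDegree n d with
  | case1 d h ih => exact ih
  | case2 d h => omega

-- the combine formula, common to both ports' internal nodes
def pvCombine (L R : Int × Int × Int × Int) : Int × Int × Int × Int :=
  (max (max L.1 R.1) (L.2.2.1 + R.2.1),
   if L.1 = L.2.2.2 then L.1 + R.2.1 else L.2.1,
   if R.1 = R.2.2.2 then R.1 + L.2.2.1 else R.2.2.1,
   L.2.2.2 + R.2.2.2)

def pvStep (ts : List (Int × Int × Int × Int)) (j : Nat) : List (Int × Int × Int × Int) :=
  ts.set j (pvCombine (ts.getD (2*j+1) (0,0,0,1)) (ts.getD (2*j+2) (0,0,0,1)))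

theorem pvValue_leaf (array : List Int) (size node : Nat) (h : size - 1 ≤ node) :
    pvValue array size node =
      if node - (size-1) < array.length ∧ array.getD (node - (size-1)) 0 = 0
      then (1,1,1,1) else (0,0,0,1) := by
  rw [pvValue]; simp [h]

theorem pvValue_node (array : List Int) (size node : Nat) (h : ¬ size - 1 ≤ node) :
    pvValue array size node =
      pvCombine (pvValue array size (2*node+1)) (pvValue array size (2*node+2)) := by
  rw [pvValue]; simp [h, pvCombine]

theorem pv_range_map_sub (m : Nat) :
    (List.range m).map (fun k => m - 1 - k) = (List.range m).reverse := by
  apply List.ext_getElem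
  · simp
  · intro k h1 h2
    simp only [List.getElem_map, List.getElem_range, List.getElem_reverse, List.length_range]

-- the leaf loop fills positions size-1 .. size-1+m-1, leaving the rest at the default
theorem pv_leafLoop (array : List Int) (size : Nat) (hs : 1 ≤ size) (_hbd : array.length ≤ size) :
    ∀ m, m ≤ array.length →
    (List.range m).foldl
      (fun ts i => ts.set (i + size - 1) (if array.getD i 0 = 0 then ((1:Int),1,1,1) else (0,0,0,1)))
      (List.replicate (size * 2 - 1) ((0,0,0,1) : Int × Int × Int × Int))
    = (List.range (size * 2 - 1)).map
        (fun k => if size - 1 ≤ k ∧ k - (size-1) < m ∧ array.getD (k - (size-1)) 0 = 0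
                  then ((1,1,1,1) : Int × Int × Int × Int) else (0,0,0,1)) := by
  intro m
  induction m with
  | zero =>
    intro _
    simp only [List.range_zero, List.foldl_nil]
    apply List.ext_getElem
    · simp
    · intro k h1 h2
      simp only [List.getElem_replicate, List.getElem_map, List.getElem_range]
      split
      · omega
      · rfl
  | succ m ih =>
    intro hm
    rw [List.range_succ, List.foldl_append, ih (by omega), List.foldl_cons, List.foldl_nil]
    apply List.ext_getElem
    · simp
    · intro k h1 h2
      simp only [List.length_set, List.length_map, List.length_range] at h1
      rw [List.getElem_set]
      simp only [List.getElem_map, List.getElem_range]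
      by_cases hk : m + size - 1 = k
      · have hkk : k - (size - 1) = m := by omega
        have hp : size - 1 ≤ k := by omega
        have hlt : k - (size - 1) < m + 1 := by omega
        simp [hk, hkk, hp]
      · rw [if_neg hk]
        by_cases hp : size - 1 ≤ k
        · have he : (k - (size-1) < m + 1) ↔ (k - (size-1) < m) := by omega
          simp only [he]
        · simp [hp]

-- the reverse internal loop: once every index ≥ t holds its recursive value,
-- processing t-1, …, 0 makes every index hold its recursive value
theorem pv_down (array : List Int) (size : Nat) (hs : 1 ≤ size) :
    ∀ t, t ≤ size - 1 → ∀ ts : List (Int × Int × Int × Int), ts.length = size*2-1 →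
    (∀ k, t ≤ k → k < size*2-1 → ts.getD k (0,0,0,1) = pvValue array size k) →
    (List.range t).reverse.foldl pvStep ts = (List.range (size*2-1)).map (pvValue array size) := by
  intro t
  induction t with
  | zero =>
    intro _ ts hlen hinv
    simp only [List.range_zero, List.reverse_nil, List.foldl_nil]
    apply List.ext_getElem
    · simp [hlen]
    · intro k h1 h2
      have hk : k < size*2-1 := by omega
      have := hinv k (Nat.zero_le k) hk
      rw [List.getD_eq_getElem _ _ h1] at this
      simpa using this
  | succ t ih =>
    intro ht ts hlen hinv
    have hcons : (List.range (t+1)).reverse = t :: (List.range t).reverse := by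
      rw [List.range_succ, List.reverse_append]; rfl
    rw [hcons, List.foldl_cons]
    apply ih (by omega)
    · simp [pvStep, hlen]
    · intro k hk hk2
      unfold pvStep
      have htlen : t < ts.length := by omega
      by_cases hkt : k = t
      · subst hkt
        have hc1 := hinv (2*k+1) (by omega) (by omega)
        have hc2 := hinv (2*k+2) (by omega) (by omega)
        rw [List.getD_eq_getElem _ _ (by simpa using htlen), List.getElem_set, if_pos rfl,
          hc1, hc2, ← pvValue_node array size k (by omega)]
      · have hklen : k < ts.length := by omega
        rw [List.getD_eq_getElem _ _ (by simpa using hklen), List.getElem_set, if_neg (by omega)]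
        have := hinv k (by omega) hk2
        rw [List.getD_eq_getElem _ _ hklen] at this
        exact this

theorem get_treeset_eq (array : List Int) : get_treeset array = get_treeset_alt array := by
  obtain ⟨size, hsize, hs1, hns⟩ :
      ∃ size, 2 ^ pvDegree array.length 0 = size ∧ 1 ≤ size ∧ array.length ≤ size :=
    ⟨_, rfl, Nat.one_le_two_pow, pvDegree_ge _ 0⟩
  unfold get_treeset get_treeset_alt
  simp only [hsize]
  refine Prod.ext ?_ rfl
  -- 1. the leaf loop
  have hbody : (fun (ts : List (Int × Int × Int × Int)) i =>
      if array.getD i 0 = 0 then ts.set (i + size - 1) ((1:Int),1,1,1)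
      else ts.set (i + size - 1) (0,0,0,1))
    = fun ts i => ts.set (i + size - 1) (if array.getD i 0 = 0 then ((1,1,1,1) : Int × Int × Int × Int) else (0,0,0,1)) := by
    funext ts i; split <;> rfl
  rw [hbody, pv_leafLoop array size hs1 hns array.length le_rfl]
  -- 2. the countdown range, as the reversed natural range
  have h9 : ((size : Int) - 2 - (-1)).toNat = size - 1 := by omega
  have hR : PySem.List.pyRange ((size : Int) - 2) (-1) (-1)
      = ((List.range (size - 1)).reverse).map (fun k : Nat => (k : Int)) := by
    rw [PySem.List.pyRange_neg_one, h9, ← pv_range_map_sub (size - 1)]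
    simp only [List.map_map]
    apply List.map_congr_left
    intro k hk
    simp only [List.mem_range] at hk
    simp only [Function.comp_apply]
    omega
  rw [hR, List.foldl_map]
  simp only [Int.toNat_natCast]
  -- 3./4. run the internal loop
  have hfin := pv_down array size hs1 (size - 1) le_rfl
    ((List.range (size * 2 - 1)).map
        (fun k => if size - 1 ≤ k ∧ k - (size-1) < array.length ∧ array.getD (k - (size-1)) 0 = 0
                  then ((1,1,1,1) : Int × Int × Int × Int) else (0,0,0,1)))
    (by simp)
    (by
      intro k hk hk2
      rw [List.getD_eq_getElem _ _ (by simpa using hk2)]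
      simp only [List.getElem_map, List.getElem_range]
      rw [pvValue_leaf array size k hk]
      simp [hk])
  rw [(by omega : 2 * size - 1 = size * 2 - 1)]
  exact hfin

-- ===== VERDICT (by name: the statement is the Claim_ definition above) =====
theorem get_treeset_spec : Claim_equal_get_treeset := by
  intro array _
  unfold Spec_get_treeset
  exact get_treeset_eq array
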